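-- pv_equiv track=rewrite | github.com/aphonologist/directionalHSautosegments | gen.py | gen_autoseg
-- ===== SOURCE A (Python) =====
-- def gen_autoseg(input):
-- 	candidates = set([])
--
-- 	# add fully faithful candidate
-- 	candidates.add(input)
--
-- 	for i in range(len(input) - 1):
-- 		# spread to the left
-- 		if input[i:i+2] == 'XL':
-- 			candidate = input[:i] + 'lM' + input[i+2:]
-- 			candidates.add(candidate)
-- 		if input[i:i+2] == 'XF':
-- 			candidate = input[:i] + 'lR' + input[i+2:]
-- 			candidates.add(candidate)
-- 		# spread to the right
-- 		if input[i:i+2] == 'RX':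
-- 			candidate = input[:i] + 'Mr' + input[i+2:]
-- 			candidates.add(candidate)
-- 		if input[i:i+2] == 'FX':
-- 			candidate = input[:i] + 'Lr' + input[i+2:]
-- 			candidates.add(candidate)
-- 		# delink
-- 		if input[i:i+2] == 'XF':
-- 			candidate = input[:i] + 'Xx' + input[i+2:]
-- 			candidates.add(candidate)
-- 		if input[i:i+2] == 'FX':
-- 			candidate = input[:i] + 'xX' + input[i+2:]
-- 			candidates.add(candidate)
-- 		if input[i:i+2] == 'LM':
-- 			candidate = input[:i] + 'xL' + input[i+2:]
-- 			candidates.add(candidate)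
-- 		if input[i:i+2] == 'MR':
-- 			candidate = input[:i] + 'Rx' + input[i+2:]
-- 			candidates.add(candidate)
-- 		if input[i:i+2] == 'LR':
-- 			candidate = input[:i] + 'xF' + input[i+2:]
-- 			candidates.add(candidate)
-- 			candidate = input[:i] + 'Fx' + input[i+2:]
-- 			candidates.add(candidate)
--
-- 	return sorted(list(candidates))
-- ===== SOURCE B (Python) =====
-- PATTERNS = (('XL', ('lM',)), ('XF', ('lR', 'Xx')), ('RX', ('Mr',)), ('FX', ('Lr', 'xX')),
--             ('LM', ('xL',)), ('MR', ('Rx',)), ('LR', ('xF', 'Fx')))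
--
-- def gen_autoseg(input):
--     candidates = {input}
--     # rule-major: for each rewrite rule, substring-search all occurrences of
--     # its pattern (str.find) instead of testing every position against every rule
--     for pat, repls in PATTERNS:
--         j = input.find(pat)
--         while j != -1:
--             for repl in repls:
--                 candidates.add(input[:j] + repl + input[j + 2:])
--             j = input.find(pat, j + 1)
--     return sorted(candidates)
-- ===== Notes on version B (the rewrite author's own statement) =====
-- stated objective: faster
-- what changed: B traverses rule-major instead of position-major: for each of the seven rewrite rules it substring-searches all occurrences of the rule's pattern with str.find in a while loop and applies the replacements there, instead of A's single scan over positions testing each adjacent pair against nine independent equality branches; the set/sorted output makes the traversal order irrelevant.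
import Mathlib
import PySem

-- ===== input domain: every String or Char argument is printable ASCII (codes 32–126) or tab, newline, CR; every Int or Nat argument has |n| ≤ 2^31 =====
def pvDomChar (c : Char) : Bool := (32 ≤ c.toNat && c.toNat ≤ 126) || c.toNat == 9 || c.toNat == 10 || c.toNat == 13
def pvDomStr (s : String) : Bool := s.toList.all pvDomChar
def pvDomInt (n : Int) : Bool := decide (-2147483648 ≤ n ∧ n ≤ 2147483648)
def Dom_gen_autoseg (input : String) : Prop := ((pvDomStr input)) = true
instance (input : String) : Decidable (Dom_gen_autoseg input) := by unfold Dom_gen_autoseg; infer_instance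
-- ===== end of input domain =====

-- B traverses rule-major: for each rewrite rule it substring-searches all occurrences of
-- its pattern (str.find in a while loop) instead of A's position-major scan that tests
-- every adjacent pair against all nine branches (objective: faster, as measured by the
-- timing run — same asymptotics, constant-factor mechanism).

-- ===== PORT A =====
-- input[:i] + repl + input[i+2:]  (shared by both ports: both Pythons build exactly this string)
def substAt (s : List Char) (i : Int) (r : String) : String :=
  String.ofList (PySem.List.slice s none (some i) ++ r.toList ++ PySem.List.slice s (some (i + 2)) none)

-- 'if input[i:i+2] == P: candidates.add(c)' rendered once as a helper
def addIf (c : Prop) [Decidable c] (x : String) (acc : PySem.Set String) : PySem.Set String :=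
  if c then acc.add x else acc

-- one loop iteration of A: the nine equality tests, in A's order
def genA_step (s : List Char) (acc : PySem.Set String) (i : Nat) : PySem.Set String :=
  let pair := PySem.List.slice s (some (i : Int)) (some ((i : Int) + 2))
  let acc := addIf (pair = "XL".toList) (substAt s i "lM") acc
  let acc := addIf (pair = "XF".toList) (substAt s i "lR") acc
  let acc := addIf (pair = "RX".toList) (substAt s i "Mr") acc
  let acc := addIf (pair = "FX".toList) (substAt s i "Lr") acc
  let acc := addIf (pair = "XF".toList) (substAt s i "Xx") acc
  let acc := addIf (pair = "FX".toList) (substAt s i "xX") acc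
  let acc := addIf (pair = "LM".toList) (substAt s i "xL") acc
  let acc := addIf (pair = "MR".toList) (substAt s i "Rx") acc
  let acc := addIf (pair = "LR".toList) (substAt s i "Fx") (addIf (pair = "LR".toList) (substAt s i "xF") acc)
  acc

def gen_autoseg (input : String) : List String :=
  let s := input.toList
  let candidates : PySem.Set String := (PySem.Set.ofList []).add input
  let candidates := (List.range (s.length - 1)).foldl (genA_step s) candidates
  PySem.List.sorted candidates (fun x => x) false

-- ===== PORT B =====
def genPatterns : List (String × List String) :=
  [("XL", ["lM"]), ("XF", ["lR", "Xx"]), ("RX", ["Mr"]), ("FX", ["Lr", "xX"]),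
   ("LM", ["xL"]), ("MR", ["Rx"]), ("LR", ["xF", "Fx"])]

-- 'for repl in repls: candidates.add(input[:j] + repl + input[j+2:])'
def genB_add (s : List Char) (j : Int) (repls : List String) (acc : PySem.Set String) : PySem.Set String :=
  repls.foldl (fun a r => a.add (substAt s j r)) acc

-- 'j = input.find(pat); while j != -1: …; j = input.find(pat, j+1)' — fuel only makes
-- the loop structurally terminating (len(s)+1 iterations always suffice: j strictly grows)
def genB_while (s pat : List Char) (repls : List String) (fuel : Nat)
    (acc : PySem.Set String) (j : Int) : PySem.Set String :=
  match fuel with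
  | 0 => acc
  | fuel + 1 =>
    if j = -1 then acc
    else genB_while s pat repls fuel (genB_add s j repls acc) (PySem.Chars.findFrom s pat (j + 1) none)

def gen_autoseg_alt (input : String) : List String :=
  let s := input.toList
  let candidates : PySem.Set String := (PySem.Set.ofList []).add input
  let candidates := genPatterns.foldl
    (fun acc pr => genB_while s pr.1.toList pr.2 (s.length + 1) acc (PySem.Chars.find s pr.1.toList))
    candidates
  PySem.List.sorted candidates (fun x => x) false

-- ===== PRECONDITION & SPEC =====
def Spec_gen_autoseg (input : String) (out : List String) : Prop := out = gen_autoseg_alt input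
instance (input : String) (out : List String) : Decidable (Spec_gen_autoseg input out) := by unfold Spec_gen_autoseg; infer_instance

-- ===== CLAIM (what is proved, stated in full; the proofs are below) =====
def Claim_equal_gen_autoseg : Prop := ∀ (input : String), Dom_gen_autoseg input → Spec_gen_autoseg input (gen_autoseg input)

-- ===== LEMMAS AND PROOFS =====

-- the canonical description both sides are reduced to: some rule's pattern matches at i
-- and x is the corresponding substitution
def GenHit (s : List Char) (x : String) (i : Nat) : Prop :=
  ∃ pr ∈ genPatterns, pr.1.toList <+: s.drop i ∧ ∃ r ∈ pr.2, x = substAt s i r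

theorem mem_addIf (c : Prop) [Decidable c] (y : String) (acc : PySem.Set String) (x : String) :
    x ∈ addIf c y acc ↔ x ∈ acc ∨ (c ∧ x = y) := by
  unfold addIf; split_ifs with h
  · rw [PySem.Set.mem_add]; tauto
  · tauto

theorem nodup_addIf (c : Prop) [Decidable c] (y : String) (acc : PySem.Set String)
    (hnd : acc.Nodup) : (addIf c y acc).Nodup := by
  unfold addIf; split_ifs with h
  · exact PySem.Set.nodup_add _ _ hnd
  · exact hnd

-- generic membership / nodup through a foldl of set-growing steps
theorem mem_foldl_step {β : Type} (f : PySem.Set String → β → PySem.Set String)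
    (P : String → β → Prop) :
    ∀ (l : List β), (∀ acc b, b ∈ l → ∀ x, x ∈ f acc b ↔ x ∈ acc ∨ P x b) →
    ∀ (acc : PySem.Set String) (x : String),
      x ∈ l.foldl f acc ↔ x ∈ acc ∨ ∃ b ∈ l, P x b := by
  intro l
  induction l with
  | nil => simp
  | cons b t ih =>
    intro h acc x
    rw [List.foldl_cons, ih (fun acc c hc x => h acc c (List.mem_cons_of_mem b hc) x) (f acc b) x,
      h acc b (List.mem_cons_self) x]
    simp only [List.mem_cons]
    constructor
    · rintro ((h1 | h1) | ⟨c, hc, h1⟩)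
      · exact Or.inl h1
      · exact Or.inr ⟨b, Or.inl rfl, h1⟩
      · exact Or.inr ⟨c, Or.inr hc, h1⟩
    · rintro (h1 | ⟨c, (rfl | hc), h1⟩)
      · exact Or.inl (Or.inl h1)
      · exact Or.inl (Or.inr h1)
      · exact Or.inr ⟨c, hc, h1⟩

theorem nodup_foldl_step {β : Type} (f : PySem.Set String → β → PySem.Set String)
    (h : ∀ acc b, acc.Nodup → (f acc b).Nodup) :
    ∀ (l : List β) (acc : PySem.Set String), acc.Nodup → (l.foldl f acc).Nodup := by
  intro l
  induction l with
  | nil => simp only [List.foldl_nil]; exact fun _ h => h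
  | cons b t ih => intro acc hnd; rw [List.foldl_cons]; exact ih _ (h acc b hnd)

-- the two-char window test of A is exactly "pattern is a prefix of drop i"
theorem pair_eq_iff_prefix (s : List Char) (i : Nat) (p : List Char) (hp : p.length = 2) :
    PySem.List.slice s (some (i : Int)) (some ((i : Int) + 2)) = p ↔ p <+: s.drop i := by
  have h2 : ((i : Int) + 2) = ((i : Int) + ((2 : Nat) : Int)) := by norm_num
  rw [h2, PySem.List.slice_natCast_add, List.prefix_iff_eq_take, ← hp]
  exact ⟨fun h => h.symm, fun h => h.symm⟩

-- one iteration of A adds exactly the GenHit i strings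
theorem genA_step_mem (s : List Char) (acc : PySem.Set String) (i : Nat) (x : String) :
    x ∈ genA_step s acc i ↔ x ∈ acc ∨ GenHit s x i := by
  have hXL := pair_eq_iff_prefix s i "XL".toList (by decide)
  have hXF := pair_eq_iff_prefix s i "XF".toList (by decide)
  have hRX := pair_eq_iff_prefix s i "RX".toList (by decide)
  have hFX := pair_eq_iff_prefix s i "FX".toList (by decide)
  have hLM := pair_eq_iff_prefix s i "LM".toList (by decide)
  have hMR := pair_eq_iff_prefix s i "MR".toList (by decide)
  have hLR := pair_eq_iff_prefix s i "LR".toList (by decide)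
  have m1 : ("XL", ["lM"]) ∈ genPatterns := by simp [genPatterns]
  have m2 : ("XF", ["lR", "Xx"]) ∈ genPatterns := by simp [genPatterns]
  have m3 : ("RX", ["Mr"]) ∈ genPatterns := by simp [genPatterns]
  have m4 : ("FX", ["Lr", "xX"]) ∈ genPatterns := by simp [genPatterns]
  have m5 : ("LM", ["xL"]) ∈ genPatterns := by simp [genPatterns]
  have m6 : ("MR", ["Rx"]) ∈ genPatterns := by simp [genPatterns]
  have m7 : ("LR", ["xF", "Fx"]) ∈ genPatterns := by simp [genPatterns]
  constructor
  · intro h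
    simp only [genA_step, mem_addIf] at h
    rcases h with ((((((((((h | h) | h) | h) | h) | h) | h) | h) | h) | h) | h)
    · exact Or.inl h
    · exact Or.inr ⟨_, m1, hXL.mp h.1, "lM", by simp, h.2⟩
    · exact Or.inr ⟨_, m2, hXF.mp h.1, "lR", by simp, h.2⟩
    · exact Or.inr ⟨_, m3, hRX.mp h.1, "Mr", by simp, h.2⟩
    · exact Or.inr ⟨_, m4, hFX.mp h.1, "Lr", by simp, h.2⟩
    · exact Or.inr ⟨_, m2, hXF.mp h.1, "Xx", by simp, h.2⟩
    · exact Or.inr ⟨_, m4, hFX.mp h.1, "xX", by simp, h.2⟩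
    · exact Or.inr ⟨_, m5, hLM.mp h.1, "xL", by simp, h.2⟩
    · exact Or.inr ⟨_, m6, hMR.mp h.1, "Rx", by simp, h.2⟩
    · exact Or.inr ⟨_, m7, hLR.mp h.1, "xF", by simp, h.2⟩
    · exact Or.inr ⟨_, m7, hLR.mp h.1, "Fx", by simp, h.2⟩
  · intro h
    simp only [genA_step, mem_addIf]
    rcases h with h | ⟨pr, hpr, hpre, r, hr, hx⟩
    · exact Or.inl (Or.inl (Or.inl (Or.inl (Or.inl (Or.inl (Or.inl (Or.inl (Or.inl (Or.inl (h))))))))))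
    · simp only [genPatterns, List.mem_cons, List.not_mem_nil, or_false] at hpr
      subst hx
      rcases hpr with h1 | h1 | h1 | h1 | h1 | h1 | h1 <;> subst h1 <;>
        simp only [List.mem_cons, List.not_mem_nil, or_false] at hr
      · subst hr; have hg := hXL.mpr hpre; exact Or.inl (Or.inl (Or.inl (Or.inl (Or.inl (Or.inl (Or.inl (Or.inl (Or.inl (Or.inr ⟨hg, rfl⟩)))))))))
      · rcases hr with hr | hr <;> subst hr
        · have hg := hXF.mpr hpre; exact Or.inl (Or.inl (Or.inl (Or.inl (Or.inl (Or.inl (Or.inl (Or.inl (Or.inr ⟨hg, rfl⟩))))))))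
        · have hg := hXF.mpr hpre; exact Or.inl (Or.inl (Or.inl (Or.inl (Or.inl (Or.inr ⟨hg, rfl⟩)))))
      · subst hr; have hg := hRX.mpr hpre; exact Or.inl (Or.inl (Or.inl (Or.inl (Or.inl (Or.inl (Or.inl (Or.inr ⟨hg, rfl⟩)))))))
      · rcases hr with hr | hr <;> subst hr
        · have hg := hFX.mpr hpre; exact Or.inl (Or.inl (Or.inl (Or.inl (Or.inl (Or.inl (Or.inr ⟨hg, rfl⟩))))))
        · have hg := hFX.mpr hpre; exact Or.inl (Or.inl (Or.inl (Or.inl (Or.inr ⟨hg, rfl⟩))))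
      · subst hr; have hg := hLM.mpr hpre; exact Or.inl (Or.inl (Or.inl (Or.inr ⟨hg, rfl⟩)))
      · subst hr; have hg := hMR.mpr hpre; exact Or.inl (Or.inl (Or.inr ⟨hg, rfl⟩))
      · rcases hr with hr | hr <;> subst hr
        · have hg := hLR.mpr hpre; exact Or.inl (Or.inr ⟨hg, rfl⟩)
        · have hg := hLR.mpr hpre; exact Or.inr ⟨hg, rfl⟩

theorem genA_step_nodup (s : List Char) (acc : PySem.Set String) (i : Nat)
    (hnd : acc.Nodup) : (genA_step s acc i).Nodup := by
  simp only [genA_step]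
  exact nodup_addIf _ _ _ (nodup_addIf _ _ _ (nodup_addIf _ _ _ (nodup_addIf _ _ _
    (nodup_addIf _ _ _ (nodup_addIf _ _ _ (nodup_addIf _ _ _ (nodup_addIf _ _ _
    (nodup_addIf _ _ _ (nodup_addIf _ _ _ hnd)))))))))

-- B side: the inner replacement loop
theorem genB_add_mem (s : List Char) (j : Int) (rs : List String) (acc : PySem.Set String)
    (x : String) : x ∈ genB_add s j rs acc ↔ x ∈ acc ∨ ∃ r ∈ rs, x = substAt s j r := by
  unfold genB_add
  exact mem_foldl_step _ (fun x r => x = substAt s j r) rs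
    (fun acc r _ x => PySem.Set.mem_add _ _ _) acc x

theorem genB_add_nodup (s : List Char) (j : Int) (rs : List String) (acc : PySem.Set String)
    (hnd : acc.Nodup) : (genB_add s j rs acc).Nodup := by
  unfold genB_add
  exact nodup_foldl_step _ (fun acc r h => PySem.Set.nodup_add _ _ h) rs acc hnd

theorem genB_while_nodup (s pat : List Char) (rs : List String) :
    ∀ (fuel : Nat) (acc : PySem.Set String) (j : Int), acc.Nodup →
      (genB_while s pat rs fuel acc j).Nodup := by
  intro fuel
  induction fuel with
  | zero => intro acc j h; simpa [genB_while] using h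
  | succ n ih =>
    intro acc j h
    rw [genB_while]
    split_ifs with hj
    · exact h
    · exact ih _ _ (genB_add_nodup s j rs acc h)

-- "pat occurs somewhere in s.drop k" unpacked to a position ≥ k
theorem infix_drop_iff (pat s : List Char) (k : Nat) :
    pat <:+: s.drop k ↔ ∃ j, k ≤ j ∧ pat <+: s.drop j := by
  rw [← PySem.Chars.isIn_iff_infix, ← PySem.Chars.exists_prefix_drop_iff_isIn]
  constructor
  · rintro ⟨j, hj⟩
    exact ⟨k + j, Nat.le_add_right _ _, by rwa [List.drop_drop] at hj⟩
  · rintro ⟨j, hk, hj⟩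
    refine ⟨j - k, ?_⟩
    rw [List.drop_drop, Nat.add_comm, Nat.sub_add_cancel hk]
    exact hj

-- the while loop over find: it collects exactly the substitutions at every
-- occurrence position ≥ k
theorem genB_while_mem (s pat : List Char) (rs : List String) (hpat : pat ≠ []) :
    ∀ (fuel k : Nat) (acc : PySem.Set String) (x : String), k ≤ s.length →
      s.length + 1 ≤ fuel + k →
      (x ∈ genB_while s pat rs fuel acc (PySem.Chars.findFrom s pat (k : Int) none) ↔
        x ∈ acc ∨ ∃ j, k ≤ j ∧ pat <+: s.drop j ∧ ∃ r ∈ rs, x = substAt s (j : Int) r) := by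
  intro fuel
  induction fuel with
  | zero => intro k acc x hk hfuel; omega
  | succ n ih =>
    intro k acc x hk hfuel
    rw [genB_while]
    split_ifs with hj
    · rw [PySem.Chars.findFrom_natCast_eq_neg_one_iff s pat k hk] at hj
      rw [infix_drop_iff] at hj
      constructor
      · exact Or.inl
      · rintro (h | ⟨j, h1, h2, _⟩)
        · exact h
        · exact absurd ⟨j, h1, h2⟩ hj
    · obtain ⟨hge, hpre, hmin⟩ := PySem.Chars.findFrom_natCast_spec s pat k hk hj
      set jf := PySem.Chars.findFrom s pat (k : Int) none with hjf
      have hj0 : (0 : Int) ≤ jf := le_trans (by exact_mod_cast Nat.zero_le k) hge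
      have hjm : jf = ((jf.toNat : Nat) : Int) := (Int.toNat_of_nonneg hj0).symm
      have hkm : k ≤ jf.toNat := by omega
      have hmlt : jf.toNat < s.length := by
        have hlen : pat.length ≤ (s.drop jf.toNat).length := hpre.length_le
        rw [List.length_drop] at hlen
        have : 1 ≤ pat.length := Nat.one_le_iff_ne_zero.mpr (by
          intro h; exact hpat (List.eq_nil_of_length_eq_zero h))
        omega
      have hstep : jf + 1 = (((jf.toNat + 1 : Nat)) : Int) := by omega
      rw [hstep, ih (jf.toNat + 1) _ x (by omega) (by omega), genB_add_mem]
      rw [hjm]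
      constructor
      · rintro ((h | ⟨r, hr, hx⟩) | ⟨j, h1, h2, h3⟩)
        · exact Or.inl h
        · exact Or.inr ⟨jf.toNat, hkm, hpre, r, hr, hx⟩
        · exact Or.inr ⟨j, by omega, h2, h3⟩
      · rintro (h | ⟨j, h1, h2, h3⟩)
        · exact Or.inl (Or.inl h)
        · rcases Nat.lt_or_ge j (jf.toNat + 1) with hlt | hge'
          · have hje : j = jf.toNat := by
              rcases Nat.lt_or_ge j jf.toNat with hlt' | hge''
              · exact absurd h2 (hmin j h1 hlt')
              · omega
            subst hje
            obtain ⟨r, hr, hx⟩ := h3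
            exact Or.inl (Or.inr ⟨r, hr, hx⟩)
          · exact Or.inr ⟨j, hge', h2, h3⟩

-- any occurrence of a 2-char pattern starts before len - 1
theorem hit_lt (s pat : List Char) (j : Nat) (hp : pat.length = 2) (h : pat <+: s.drop j) :
    j < s.length - 1 := by
  have hlen : pat.length ≤ (s.drop j).length := h.length_le
  rw [List.length_drop] at hlen
  omega

theorem genPatterns_len : ∀ pr ∈ genPatterns, pr.1.toList.length = 2 := by decide

-- membership in A\'s final candidate set
theorem memA (input : String) (x : String) :
    x ∈ (List.range (input.toList.length - 1)).foldl (genA_step input.toList)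
        ((PySem.Set.ofList []).add input) ↔
      x = input ∨ ∃ i, GenHit input.toList x i := by
  rw [mem_foldl_step (genA_step input.toList) (GenHit input.toList) _
    (fun acc i _ x => genA_step_mem input.toList acc i x)]
  simp only [PySem.Set.mem_add, List.mem_range]
  constructor
  · rintro (h | ⟨i, _, h⟩)
    · simp at h; tauto
    · exact Or.inr ⟨i, h⟩
  · rintro (h | ⟨i, h⟩)
    · exact Or.inl (by simp [h])
    · obtain ⟨pr, hpr, hpre, hr⟩ := h
      exact Or.inr ⟨i, hit_lt _ _ i (genPatterns_len pr hpr) hpre, pr, hpr, hpre, hr⟩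

-- membership in B\'s final candidate set
theorem memB (input : String) (x : String) :
    x ∈ genPatterns.foldl
        (fun acc pr => genB_while input.toList pr.1.toList pr.2 (input.toList.length + 1) acc
          (PySem.Chars.find input.toList pr.1.toList))
        ((PySem.Set.ofList []).add input) ↔
      x = input ∨ ∃ i, GenHit input.toList x i := by
  rw [mem_foldl_step _
    (fun x pr => ∃ j, pr.1.toList <+: input.toList.drop j ∧ ∃ r ∈ pr.2, x = substAt input.toList (j : Int) r)
    genPatterns
    (fun acc pr hpr x => by
      have hpat : pr.1.toList ≠ [] := by
        have h2 := genPatterns_len pr hpr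
        intro hnil; rw [hnil] at h2; simp at h2
      have h0 : PySem.Chars.find input.toList pr.1.toList =
          PySem.Chars.findFrom input.toList pr.1.toList ((0 : Nat) : Int) none := by
        rw [Nat.cast_zero, PySem.Chars.findFrom_zero]
      rw [h0, genB_while_mem input.toList pr.1.toList pr.2 hpat (input.toList.length + 1) 0 acc x
        (Nat.zero_le _) (by omega)]
      simp)]
  simp only [PySem.Set.mem_add]
  constructor
  · rintro (h | ⟨pr, hpr, j, hpre, hr⟩)
    · simp at h; tauto
    · exact Or.inr ⟨j, pr, hpr, hpre, hr⟩
  · rintro (h | ⟨i, pr, hpr, hpre, hr⟩)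
    · exact Or.inl (by simp [h])
    · exact Or.inr ⟨pr, hpr, i, hpre, hr⟩

-- ===== VERDICT (by name: the statement is the Claim_ definition above) =====
theorem gen_autoseg_spec : Claim_equal_gen_autoseg := by
  intro input _
  unfold Spec_gen_autoseg gen_autoseg gen_autoseg_alt
  have hnd0 : ((PySem.Set.ofList []).add input).Nodup :=
    PySem.Set.nodup_add _ _ (by simp [PySem.Set.ofList])
  have hndA := nodup_foldl_step (genA_step input.toList)
    (fun acc i h => genA_step_nodup input.toList acc i h)
    (List.range (input.toList.length - 1)) _ hnd0
  have hndB := nodup_foldl_step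
    (fun acc pr => genB_while input.toList pr.1.toList pr.2 (input.toList.length + 1) acc
      (PySem.Chars.find input.toList pr.1.toList))
    (fun acc pr h => genB_while_nodup _ _ _ _ _ _ h) genPatterns _ hnd0
  have hperm : (List.Perm
      ((List.range (input.toList.length - 1)).foldl (genA_step input.toList)
        ((PySem.Set.ofList []).add input))
      (genPatterns.foldl
        (fun acc pr => genB_while input.toList pr.1.toList pr.2 (input.toList.length + 1) acc
          (PySem.Chars.find input.toList pr.1.toList))
        ((PySem.Set.ofList []).add input))) := by
    rw [List.perm_ext_iff_of_nodup hndA hndB]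
    intro a
    rw [memA, memB]
  exact PySem.List.sorted_eq_sorted_of_perm _ _ (fun x => x) (fun a b h => h) hperm
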